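-- pv_equiv track=rewrite | github.com/Abhijeet-14/DSA-OOPS-LLD | __DSA_PYTHON/01-DSA/04_Concepts_dsa/ARRAY_binary_search/04_bs_pivot.py | find_peek
-- ===== SOURCE A (Python) =====
-- def find_peek(arr):
--     N = len(arr)
--     start = 0
--     end = N - 1
--
--     while start <= end:
--         peek = (end + start) // 2
--         peek_minus_one = (peek - 1 + N) % N
--         peek_plus_one = (peek + 1) % N
--         if arr[peek] >= arr[peek_minus_one] and arr[peek] >= arr[peek_plus_one]:
--             return peek
--         elif arr[peek] > arr[end]:
--             start = peek + 1
--         else: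
--             end = peek - 1
--
--     return -1
-- ===== SOURCE B (Python) =====
-- def find_peek(arr):
--     n = len(arr)
--
--     def is_peak(i):
--         return arr[i] >= arr[i - 1] and arr[i] >= arr[(i + 1) % n]
--
--     def go(lo, length):
--         if length == 0:
--             return -1
--         k = (length - 1) // 2
--         mid = lo + k
--         if is_peak(mid):
--             return mid
--         if arr[mid] > arr[lo + length - 1]:
--             return go(mid + 1, length - 1 - k)
--         return go(lo, k)
--
--     return go(0, n)
-- ===== Notes on version B (the rewrite author's own statement) =====
-- stated objective: alternative
-- what changed: A's iterative while-loop over endpoint state (start, end) becomes a divide-and-conquer recursion go(lo, length) on the interval LENGTH (a natural number that strictly shrinks, so no fuel/loop guard is needed), with the peak test factored into an is_peak helper that uses Python negative indexing instead of A's (peek-1+N)%N arithmetic.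
import Mathlib
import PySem

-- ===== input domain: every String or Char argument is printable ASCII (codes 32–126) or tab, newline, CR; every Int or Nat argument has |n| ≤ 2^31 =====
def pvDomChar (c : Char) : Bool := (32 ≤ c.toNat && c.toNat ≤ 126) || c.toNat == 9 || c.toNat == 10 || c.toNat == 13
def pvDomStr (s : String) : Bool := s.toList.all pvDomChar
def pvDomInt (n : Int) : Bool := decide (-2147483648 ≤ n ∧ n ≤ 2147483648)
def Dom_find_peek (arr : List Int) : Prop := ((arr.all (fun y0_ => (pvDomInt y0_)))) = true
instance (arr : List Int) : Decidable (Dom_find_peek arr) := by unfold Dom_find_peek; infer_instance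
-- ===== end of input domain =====

-- B replaces A's while-loop over endpoint state (start, end) by a divide-and-conquer recursion on the
-- interval LENGTH (a Nat, strictly decreasing, so B's port needs no fuel), with the peak test factored
-- into an is_peak helper using Python negative indexing (objective: alternative, same cost).

-- ===== PORT A =====
-- literal port of A's while loop: state (start, end_) threaded through a tail recursion;
-- fuel len+1 is never exhausted since the interval [start, fin] shrinks each iteration
def find_peek_loopA (arr : List Int) (N : Int) : Nat → Int → Int → Int
  | 0, _, _ => -1
  | fuel + 1, start, fin =>
    if start ≤ fin then
      if PySem.List.pyGetD arr (PySem.Int.floordiv (fin + start) 2) 0 ≥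
           PySem.List.pyGetD arr (PySem.Int.mod (PySem.Int.floordiv (fin + start) 2 - 1 + N) N) 0 ∧
         PySem.List.pyGetD arr (PySem.Int.floordiv (fin + start) 2) 0 ≥
           PySem.List.pyGetD arr (PySem.Int.mod (PySem.Int.floordiv (fin + start) 2 + 1) N) 0 then
        PySem.Int.floordiv (fin + start) 2
      else if PySem.List.pyGetD arr (PySem.Int.floordiv (fin + start) 2) 0 >
                PySem.List.pyGetD arr fin 0 then
        find_peek_loopA arr N fuel (PySem.Int.floordiv (fin + start) 2 + 1) fin
      else
        find_peek_loopA arr N fuel start (PySem.Int.floordiv (fin + start) 2 - 1)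
    else -1

def find_peek (arr : List Int) : Int :=
  find_peek_loopA arr (PySem.List.len arr) (arr.length + 1) 0 (PySem.List.len arr - 1)

-- ===== PORT B =====
-- literal port of Source B's is_peak: left neighbour via Python negative index arr[i-1]
def isPeakB (arr : List Int) (n : Int) (i : Int) : Bool :=
  decide (PySem.List.pyGetD arr i 0 ≥ PySem.List.pyGetD arr (i - 1) 0) &&
  decide (PySem.List.pyGetD arr i 0 ≥ PySem.List.pyGetD arr (PySem.Int.mod (i + 1) n) 0)

-- literal port of Source B's go(lo, length): structural descent on the interval length
def find_peek_goB (arr : List Int) (n : Int) : Int → Nat → Int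
  | _, 0 => -1
  | lo, len + 1 =>
    let k := len / 2                    -- (length - 1) // 2
    let mid := lo + (k : Int)
    if isPeakB arr n mid then mid
    else if PySem.List.pyGetD arr mid 0 > PySem.List.pyGetD arr (lo + (len : Int)) 0 then
      find_peek_goB arr n (mid + 1) (len - k)
    else
      find_peek_goB arr n lo k
  termination_by _ len => len
  decreasing_by all_goals omega

def find_peek_alt (arr : List Int) : Int :=
  find_peek_goB arr (PySem.List.len arr) 0 arr.length

-- ===== PRECONDITION & SPEC =====
def Spec_find_peek (arr : List Int) (out : Int) : Prop := out = find_peek_alt arr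
instance (arr : List Int) (out : Int) : Decidable (Spec_find_peek arr out) := by unfold Spec_find_peek; infer_instance

-- ===== CLAIM =====
def Claim_equal_find_peek : Prop := ∀ (arr : List Int), Dom_find_peek arr → Spec_find_peek arr (find_peek arr)

-- ===== LEMMAS AND PROOFS =====

-- left neighbour: A's (peek-1+N) % N index reads the same element as B's negative index peek-1
lemma left_nbr_eq (arr : List Int) (peek : Int) (h0 : 0 ≤ peek) (hlt : peek < (arr.length : Int)) :
    PySem.List.pyGetD arr (PySem.Int.mod (peek - 1 + (arr.length : Int)) (arr.length : Int)) 0 =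
    PySem.List.pyGetD arr (peek - 1) 0 := by
  have hN : (0:Int) < (arr.length : Int) := by omega
  rw [PySem.Int.mod_eq_emod_of_pos hN]
  by_cases hz : peek = 0
  · subst hz
    have hmod : (0 - 1 + (arr.length : Int)) % (arr.length : Int) = 0 - 1 + (arr.length : Int) :=
      Int.emod_eq_of_lt (by omega) (by omega)
    rw [hmod]
    have hne : arr ≠ [] := by
      intro hnil; subst hnil; simp at hN
    have hR : PySem.List.pyGetD arr (0 - 1) 0 = arr.getLast hne := by
      rw [show (0:Int) - 1 = -1 by ring]
      exact PySem.List.pyGetD_neg_one arr 0 hne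
    rw [PySem.List.pyGetD_eq_getElem arr 0 (by omega) (by omega), hR, List.getLast_eq_getElem]
    congr 1
    omega
  · have hmod : (peek - 1 + (arr.length : Int)) % (arr.length : Int) = peek - 1 := by
      rw [Int.add_emod_right, Int.emod_eq_of_lt (by omega) (by omega)]
    rw [hmod]

-- A's midpoint (start+fin)//2 is start plus half the (length-1), as B computes it
lemma mid_eq (start fin : Int) (m : Nat) (hm : fin - start = (m : Int)) :
    PySem.Int.floordiv (fin + start) 2 = start + ((m / 2 : Nat) : Int) := by
  rw [PySem.Int.floordiv_eq_ediv_of_pos (by omega)]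
  omega

-- the loop and the length-indexed recursion agree: fuel ≥ interval length suffices
lemma loop_eq_go (arr : List Int) :
    ∀ (fuel : ℕ) (start fin : Int), 0 ≤ start → fin < (arr.length : Int) →
      (fin - start + 1).toNat ≤ fuel →
      find_peek_loopA arr (arr.length : Int) fuel start fin =
      find_peek_goB arr (arr.length : Int) start (fin - start + 1).toNat := by
  intro fuel
  induction fuel with
  | zero =>
    intro start fin _ _ hle
    have h0 : (fin - start + 1).toNat = 0 := by omega
    rw [h0]
    simp [find_peek_loopA, find_peek_goB]
  | succ fuel ih =>
    intro start fin hs hf hle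
    rw [find_peek_loopA]
    by_cases h : start ≤ fin
    · obtain ⟨m, hm⟩ : ∃ m : ℕ, (fin - start + 1).toNat = m + 1 :=
        ⟨(fin - start).toNat, by omega⟩
      rw [if_pos h, hm, find_peek_goB]
      have hmfs : fin - start = (m : Int) := by omega
      have hmid := mid_eq start fin m hmfs
      rw [hmid]
      set k : Nat := m / 2 with hk
      set mid : Int := start + (k : Int) with hmiddef
      have h0 : 0 ≤ mid := by positivity
      have hlt : mid < (arr.length : Int) := by omega
      have hcond : (isPeakB arr (arr.length : Int) mid = true) ↔
          (PySem.List.pyGetD arr mid 0 ≥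
             PySem.List.pyGetD arr (PySem.Int.mod (mid - 1 + (arr.length : Int)) (arr.length : Int)) 0 ∧
           PySem.List.pyGetD arr mid 0 ≥
             PySem.List.pyGetD arr (PySem.Int.mod (mid + 1) (arr.length : Int)) 0) := by
        simp [isPeakB, left_nbr_eq arr mid h0 hlt]
      by_cases hp : isPeakB arr (arr.length : Int) mid = true
      · rw [if_pos (hcond.mp hp), if_pos hp]
      · rw [if_neg (fun hc => hp (hcond.mpr hc)), if_neg hp,
            show start + (m : Int) = fin from by omega]
        by_cases hgt : PySem.List.pyGetD arr mid 0 > PySem.List.pyGetD arr fin 0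
        · rw [if_pos hgt, if_pos hgt, ih (mid + 1) fin (by omega) hf (by omega)]
          congr 1
          omega
        · rw [if_neg hgt, if_neg hgt, ih start (mid - 1) hs (by omega) (by omega)]
          congr 1
          omega
    · have h0 : (fin - start + 1).toNat = 0 := by omega
      rw [if_neg h, h0]
      simp [find_peek_goB]

-- ===== VERDICT =====
theorem find_peek_spec : Claim_equal_find_peek := by
  intro arr _
  unfold Spec_find_peek find_peek find_peek_alt
  simp only [PySem.List.len_eq]
  have := loop_eq_go arr (arr.length + 1) 0 ((arr.length : Int) - 1) (by omega) (by omega) (by omega)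
  rw [this]
  congr 1
  omega
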